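-- pv_equiv track=rewrite | github.com/LaoZYi/harness-starter | src/agent_harness/export.py | _extract_recent_tasks
-- ===== SOURCE A (Python) =====
-- def _extract_recent_tasks(task_log: str, count: int = 10) -> list[str]:
--     blocks: list[str] = []
--     current: list[str] = []
--     for line in task_log.splitlines():
--         if line.startswith("## ") and current:
--             blocks.append("\n".join(current))
--             current = []
--         current.append(line)
--     if current:
--         blocks.append("\n".join(current))
--     return blocks[-count:] if blocks else []
-- ===== SOURCE B (Python) =====
-- def _extract_recent_tasks(task_log: str, count: int = 10) -> list[str]:
--     def blocks_of(lines):
--         if not lines: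
--             return []
--         body = []
--         i = 1
--         while i < len(lines) and not lines[i].startswith("## "):
--             body.append(lines[i])
--             i += 1
--         return ["\n".join([lines[0]] + body)] + blocks_of(lines[i:])
--     return blocks_of(task_log.splitlines())[-count:]
-- ===== Notes on version B (the rewrite author's own statement) =====
-- stated objective: alternative
-- what changed: Replaces A's single fold with mutable blocks/current accumulators by a recursive span decomposition: each call takes the head line plus the following non-header lines as one block and recurses on the remainder, with a single final slice.
import Mathlib
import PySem

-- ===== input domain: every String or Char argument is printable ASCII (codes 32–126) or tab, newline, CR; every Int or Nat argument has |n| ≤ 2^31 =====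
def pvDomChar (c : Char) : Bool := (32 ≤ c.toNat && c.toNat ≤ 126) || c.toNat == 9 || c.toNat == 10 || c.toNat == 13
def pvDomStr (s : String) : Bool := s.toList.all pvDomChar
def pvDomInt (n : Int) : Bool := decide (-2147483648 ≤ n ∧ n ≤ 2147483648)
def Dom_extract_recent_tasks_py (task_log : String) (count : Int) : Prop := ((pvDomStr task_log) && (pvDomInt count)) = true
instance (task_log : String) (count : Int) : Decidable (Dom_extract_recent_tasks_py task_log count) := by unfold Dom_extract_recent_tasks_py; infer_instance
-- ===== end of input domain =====

-- B replaces A's fold with blocks/current accumulators by a recursive span decomposition; objective: alternative (same cost).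


-- ===== PORT A =====
-- one iteration of A's for-loop over the state (blocks, current)
def pvStepA (st : List String × List String) (line : String) : List String × List String :=
  if PySem.Str.startswith line "## " && !st.2.isEmpty then
    (st.1 ++ [PySem.Str.join "\n" st.2], [line])
  else
    (st.1, st.2 ++ [line])

-- A's post-loop 'if current: blocks.append("\n".join(current))'
def pvFinA (st : List String × List String) : List String :=
  if st.2.isEmpty then st.1 else st.1 ++ [PySem.Str.join "\n" st.2]

def extract_recent_tasks_py (task_log : String) (count : Int) : List String :=
  let blocks := pvFinA ((PySem.Str.splitlines task_log).foldl pvStepA ([], []))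
  if blocks.isEmpty then [] else PySem.List.slice blocks (some (-count)) none

-- ===== PORT B =====
def pvNotHdr (l : String) : Bool := !PySem.Str.startswith l "## "

-- blocks_of: the head line plus the following non-header lines form one block; recurse on the rest
def pvBlocksOf : List String → List String
  | [] => []
  | l :: rest =>
    PySem.Str.join "\n" (l :: rest.takeWhile pvNotHdr) :: pvBlocksOf (rest.dropWhile pvNotHdr)
termination_by lines => lines.length
decreasing_by
  simp only [List.length_cons]
  exact Nat.lt_succ_of_le (List.length_dropWhile_le _ _)

def extract_recent_tasks_py_alt (task_log : String) (count : Int) : List String :=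
  PySem.List.slice (pvBlocksOf (PySem.Str.splitlines task_log)) (some (-count)) none

-- ===== PRECONDITION & SPEC =====
def Spec_extract_recent_tasks_py (task_log : String) (count : Int) (out : List String) : Prop := out = extract_recent_tasks_py_alt task_log count
instance (task_log : String) (count : Int) (out : List String) : Decidable (Spec_extract_recent_tasks_py task_log count out) := by unfold Spec_extract_recent_tasks_py; infer_instance

-- ===== CLAIM (what is proved, stated in full; the proofs are below) =====
def Claim_equal_extract_recent_tasks_py : Prop := ∀ (task_log : String) (count : Int), Dom_extract_recent_tasks_py task_log count → Spec_extract_recent_tasks_py task_log count (extract_recent_tasks_py task_log count)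

-- ===== LEMMAS AND PROOFS =====

lemma pvFold_eq_blocksOf (lines : List String) :
    ∀ (blocks current : List String), current ≠ [] →
      pvFinA (lines.foldl pvStepA (blocks, current)) =
        blocks ++ (PySem.Str.join "\n" (current ++ lines.takeWhile pvNotHdr) ::
          pvBlocksOf (lines.dropWhile pvNotHdr)) := by
  induction lines with
  | nil =>
    intro blocks current hc
    simp [pvFinA, hc, pvBlocksOf]
  | cons l rest ih =>
    intro blocks current hc
    by_cases h : PySem.Chars.startswith l.toList ['#', '#', ' '] = true
    · have hstep : pvStepA (blocks, current) l = (blocks ++ [PySem.Str.join "\n" current], [l]) := by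
        simp [pvStepA, h, hc]
      have hn : pvNotHdr l = false := by simp [pvNotHdr, h]
      rw [List.foldl_cons, hstep, ih _ [l] (by simp)]
      simp [hn, pvBlocksOf]
    · have hstep : pvStepA (blocks, current) l = (blocks, current ++ [l]) := by
        simp [pvStepA, h]
      have hn : pvNotHdr l = true := by simp [pvNotHdr, h]
      rw [List.foldl_cons, hstep, ih _ (current ++ [l]) (by simp)]
      simp [hn]

lemma pvBlocks_eq (lines : List String) :
    pvFinA (lines.foldl pvStepA ([], [])) = pvBlocksOf lines := by
  cases lines with
  | nil => simp [pvFinA, pvBlocksOf]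
  | cons l rest =>
    have hstep : pvStepA (([] : List String), ([] : List String)) l = ([], [l]) := by
      simp [pvStepA]
    rw [List.foldl_cons, hstep, pvFold_eq_blocksOf rest [] [l] (by simp)]
    simp [pvBlocksOf]

-- ===== VERDICT (by name: the statement is the Claim_ definition above) =====
theorem extract_recent_tasks_py_spec : Claim_equal_extract_recent_tasks_py := by
  intro task_log count _
  unfold Spec_extract_recent_tasks_py extract_recent_tasks_py_alt
  simp only [extract_recent_tasks_py]
  rw [pvBlocks_eq]
  by_cases h : (pvBlocksOf (PySem.Str.splitlines task_log)).isEmpty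
  · rw [if_pos h]
    rw [List.isEmpty_iff] at h
    simp [h, PySem.List.slice]
  · rw [if_neg h]
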